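-- pv_equiv track=rewrite | github.com/kat1478/SPADE_project | spade/join.py | s_join
-- ===== SOURCE A (Python) =====
-- from typing import List, Tuple
--
-- Tid = Tuple[int, int]  # (sid, eid)
--
-- def s_join(t1: List[Tid], t2: List[Tid]) -> List[Tid]:
--     """
--     S-step (temporal join): new event after old one.
--     Returns (sid, eid2) such that exists eid1 in t1 for same sid with eid1 < eid2.
--
--     Implementation: streaming by sid (no dict/sid-index build).
--     Assumes nothing besides sortability.
--     """
--     a = sorted(t1)  # (sid,eid1)
--     b = sorted(t2)  # (sid,eid2)
--
--     out: List[Tid] = []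
--     i = j = 0
--
--     while i < len(a) and j < len(b):
--         sid1, eid1 = a[i]
--         sid2, eid2 = b[j]
--
--         if sid1 < sid2:
--             # advance in a to catch up sid
--             i += 1
--             continue
--         if sid2 < sid1:
--             # advance in b to catch up sid
--             j += 1
--             continue
--
--         # same sid: collect all eid1 for this sid and all eid2 for this sid
--         sid = sid1
--
--         # get minimal eid1 in this sid (if there are multiple, any smaller works for condition eid1 < eid2)
--         min_eid1 = eid1
--         i += 1
--         while i < len(a) and a[i][0] == sid:
--             if a[i][1] < min_eid1:
--                 min_eid1 = a[i][1]
--             i += 1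
--
--         # now process all eid2 for this sid
--         while j < len(b) and b[j][0] == sid:
--             if b[j][1] > min_eid1:
--                 out.append(b[j])
--             j += 1
--
--     return out
-- ===== SOURCE B (Python) =====
-- from typing import List, Tuple
--
-- Tid = Tuple[int, int]  # (sid, eid)
--
-- def s_join(t1: List[Tid], t2: List[Tid]) -> List[Tid]:
--     """S-step join: dict of minimal eid1 per sid, then one filtering pass over sorted(t2)."""
--     min_eid1 = {}
--     for sid, eid in t1:
--         m = min_eid1.get(sid)
--         if m is None or eid < m:
--             min_eid1[sid] = eid
--     out: List[Tid] = []
--     for sid, eid in sorted(t2):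
--         m = min_eid1.get(sid)
--         if m is not None and m < eid:
--             out.append((sid, eid))
--     return out
-- ===== Notes on version B (the rewrite author's own statement) =====
-- stated objective: simpler
-- what changed: Replaced A's sort-both-lists two-pointer merge with per-sid inner while-loops by a single dict pass over t1 recording the minimal eid1 per sid, followed by one filtering pass over sorted(t2).
import Mathlib
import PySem

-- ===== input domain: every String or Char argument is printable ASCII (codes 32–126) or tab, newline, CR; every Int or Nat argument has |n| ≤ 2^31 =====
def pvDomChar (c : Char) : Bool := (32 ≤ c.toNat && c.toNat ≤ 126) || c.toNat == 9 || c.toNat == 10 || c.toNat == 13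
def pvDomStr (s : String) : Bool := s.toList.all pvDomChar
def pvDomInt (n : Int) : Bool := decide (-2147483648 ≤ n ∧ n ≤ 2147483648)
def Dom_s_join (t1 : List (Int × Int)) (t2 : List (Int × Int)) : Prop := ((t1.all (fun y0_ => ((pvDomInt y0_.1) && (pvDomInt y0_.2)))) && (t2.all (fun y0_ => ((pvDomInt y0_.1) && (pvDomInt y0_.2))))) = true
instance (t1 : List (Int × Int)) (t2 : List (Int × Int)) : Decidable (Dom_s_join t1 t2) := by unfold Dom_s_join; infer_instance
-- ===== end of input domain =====

-- B replaces A's sort-both-then-two-pointer merge by a single dict pass over t1 (minimal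
-- eid1 per sid) followed by one filtering pass over sorted(t2); objective: simpler.

-- ===== PORT A =====
-- inner while over a: fold the leading run of pairs with first component sid,
-- maintaining the running minimum; returns (min, rest-of-a)
def sMinGroup (sid : Int) (m : Int) : List (Int × Int) → Int × List (Int × Int)
  | [] => (m, [])
  | p :: t =>
    if p.1 = sid then sMinGroup sid (if p.2 < m then p.2 else m) t
    else (m, p :: t)

-- inner while over b: emit each pair of the leading run with first component sid
-- whose second component exceeds m; returns (emitted, rest-of-b)
def sEmitGroup (sid : Int) (m : Int) : List (Int × Int) → List (Int × Int) × List (Int × Int)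
  | [] => ([], [])
  | q :: t =>
    if q.1 = sid then
      let r := sEmitGroup sid m t
      (if m < q.2 then q :: r.1 else r.1, r.2)
    else ([], q :: t)

theorem sMinGroup_len (sid : Int) : ∀ (l : List (Int × Int)) (m : Int), (sMinGroup sid m l).2.length ≤ l.length := by
  intro l
  induction l with
  | nil => intro m; simp [sMinGroup]
  | cons p t ih =>
    intro m
    by_cases h : p.1 = sid
    · simpa [sMinGroup, h] using Nat.le_succ_of_le (ih _)
    · simp [sMinGroup, h]

theorem sEmitGroup_len (sid : Int) : ∀ (l : List (Int × Int)) (m : Int), (sEmitGroup sid m l).2.length ≤ l.length := by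
  intro l
  induction l with
  | nil => intro m; simp [sEmitGroup]
  | cons q t ih =>
    intro m
    by_cases h : q.1 = sid
    · simpa [sEmitGroup, h] using Nat.le_succ_of_le (ih _)
    · simp [sEmitGroup, h]

-- the main while loop of A, the two suffixes a[i:], b[j:] as the state
def sMerge : List (Int × Int) → List (Int × Int) → List (Int × Int)
  | [], _ => []
  | _ :: _, [] => []
  | p :: as_, q :: bs =>
    if p.1 < q.1 then sMerge as_ (q :: bs)
    else if q.1 < p.1 then sMerge (p :: as_) bs
    else
      let g1 := sMinGroup p.1 p.2 as_
      let g2 := sEmitGroup p.1 g1.1 (q :: bs)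
      g2.1 ++ sMerge g1.2 g2.2
  termination_by a b => a.length + b.length
  decreasing_by
  · simp
  · simp
  · have h1 := sMinGroup_len p.1 as_ p.2
    have hq : q.1 = p.1 := by omega
    have h2 : (sEmitGroup p.1 (sMinGroup p.1 p.2 as_).1 (q :: bs)).2.length ≤ bs.length := by
      simpa [sEmitGroup, hq] using sEmitGroup_len p.1 bs (sMinGroup p.1 p.2 as_).1
    simp only [List.length_cons]
    omega

def s_join (t1 : List (Int × Int)) (t2 : List (Int × Int)) : List (Int × Int) :=
  sMerge (PySem.List.sorted2 t1 Prod.fst Prod.snd) (PySem.List.sorted2 t2 Prod.fst Prod.snd)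

-- ===== PORT B =====
-- first loop of B: min_eid1[sid] = minimal eid1 for that sid
def sMinDict (t1 : List (Int × Int)) : PySem.Dict Int Int :=
  t1.foldl
    (fun d p =>
      match d.get? p.1 with
      | none => d.insert p.1 p.2
      | some m => if p.2 < m then d.insert p.1 p.2 else d)
    PySem.Dict.empty

def s_join_alt (t1 : List (Int × Int)) (t2 : List (Int × Int)) : List (Int × Int) :=
  let d := sMinDict t1
  (PySem.List.sorted2 t2 Prod.fst Prod.snd).foldl
    (fun out q =>
      match d.get? q.1 with
      | none => out
      | some m => if m < q.2 then out ++ [q] else out)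
    []

-- ===== PRECONDITION & SPEC =====
def Spec_s_join (t1 : List (Int × Int)) (t2 : List (Int × Int)) (out : List (Int × Int)) : Prop := out = s_join_alt t1 t2
instance (t1 : List (Int × Int)) (t2 : List (Int × Int)) (out : List (Int × Int)) : Decidable (Spec_s_join t1 t2 out) := by unfold Spec_s_join; infer_instance

-- ===== CLAIM (what is proved, stated in full; the proofs are below) =====
def Claim_equal_s_join : Prop := ∀ (t1 : List (Int × Int)) (t2 : List (Int × Int)), Dom_s_join t1 t2 → Spec_s_join t1 t2 (s_join t1 t2)

-- ===== LEMMAS AND PROOFS =====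

-- Python's lexicographic tuple order on (Int × Int)
def lexLE (p q : Int × Int) : Prop := p.1 < q.1 ∨ (p.1 = q.1 ∧ p.2 ≤ q.2)

-- the minimal second component among pairs of l whose first component is s
def minE? (s : Int) : List (Int × Int) → Option Int
  | [] => none
  | p :: t =>
    let r := minE? s t
    if p.1 = s then some (match r with | none => p.2 | some m => min p.2 m) else r

def minStep (s : Int) (p : Int × Int) (o : Option Int) : Option Int :=
  if p.1 = s then some (match o with | none => p.2 | some m => min p.2 m) else o

theorem minE?_eq_foldr (s : Int) (l : List (Int × Int)) : minE? s l = l.foldr (minStep s) none := by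
  induction l with
  | nil => rfl
  | cons p t ih => simp [minE?, minStep, List.foldr, ih]

theorem minStep_left_comm (s : Int) : ∀ (a b : Int × Int) (o : Option Int), minStep s a (minStep s b o) = minStep s b (minStep s a o) := by
  intro a b o
  by_cases ha : a.1 = s <;> by_cases hb : b.1 = s <;>
    cases o <;> simp [minStep, ha, hb]
  · exact min_comm _ _
  · rename_i m
    rw [← min_assoc, ← min_assoc, min_comm a.2 b.2]

theorem minE?_perm {l l' : List (Int × Int)} (s : Int) (h : l.Perm l') : minE? s l = minE? s l' := by
  rw [minE?_eq_foldr, minE?_eq_foldr]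
  haveI : LeftCommutative (minStep s) := ⟨fun a b o => minStep_left_comm s a b o⟩
  exact h.foldr_eq none

theorem minE?_eq_none (s : Int) (l : List (Int × Int)) (h : ∀ x ∈ l, x.1 ≠ s) : minE? s l = none := by
  induction l with
  | nil => rfl
  | cons p t ih =>
    have hp : p.1 ≠ s := h p (by simp)
    simp [minE?, hp, ih (fun x hx => h x (by simp [hx]))]

theorem minE?_cons_ne (s : Int) (p : Int × Int) (t : List (Int × Int)) (h : p.1 ≠ s) : minE? s (p :: t) = minE? s t := by
  simp [minE?, h]

theorem minE?_append_ne (s : Int) (g r : List (Int × Int)) (h : ∀ x ∈ g, x.1 ≠ s) : minE? s (g ++ r) = minE? s r := by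
  induction g with
  | nil => rfl
  | cons p t ih =>
    rw [List.cons_append, minE?_cons_ne s p _ (h p (by simp))]
    exact ih (fun x hx => h x (by simp [hx]))

-- ---- dict side: sMinDict computes minE?

theorem sMinDict_step_get? (d : PySem.Dict Int Int) (p : Int × Int) (s : Int) :
    (match d.get? p.1 with
      | none => d.insert p.1 p.2
      | some m => if p.2 < m then d.insert p.1 p.2 else d).get? s
    = minStep s p (d.get? s) := by
  by_cases hp : p.1 = s
  · subst hp
    cases hd : d.get? p.1 with
    | none => simp [minStep, PySem.Dict.get?_insert_self]
    | some m =>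
      by_cases hlt : p.2 < m
      · simp [minStep, hlt, PySem.Dict.get?_insert_self, min_eq_left (le_of_lt hlt)]
      · simp [minStep, hlt, hd, min_eq_right (le_of_not_gt hlt)]
  · have hne : s ≠ p.1 := fun h => hp h.symm
    cases hd : d.get? p.1 with
    | none => simp [minStep, hp, PySem.Dict.get?_insert_of_ne d p.2 hne]
    | some m =>
      by_cases hlt : p.2 < m
      · simp [minStep, hlt, hp, PySem.Dict.get?_insert_of_ne d p.2 hne]
      · simp [minStep, hlt, hp]

def ocomb (a b : Option Int) : Option Int :=
  match a, b with
  | none, b => b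
  | some m, none => some m
  | some m, some m' => some (min m m')

theorem minE?_cons (s : Int) (p : Int × Int) (t : List (Int × Int)) : minE? s (p :: t) = minStep s p (minE? s t) := rfl

theorem ocomb_none_right (a : Option Int) : ocomb a none = a := by cases a <;> rfl

theorem ocomb_minStep (s : Int) (p : Int × Int) (o r : Option Int) :
    ocomb (minStep s p o) r = ocomb o (minStep s p r) := by
  by_cases hp : p.1 = s
  · cases o <;> cases r <;> simp [minStep, ocomb, hp]
    · exact min_comm _ _
    · exact min_left_comm _ _ _
  · cases o <;> cases r <;> simp [minStep, ocomb, hp]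

theorem sMinDict_fold_get? (s : Int) : ∀ (l : List (Int × Int)) (d : PySem.Dict Int Int),
    (l.foldl (fun d p =>
      match d.get? p.1 with
      | none => d.insert p.1 p.2
      | some m => if p.2 < m then d.insert p.1 p.2 else d) d).get? s
    = ocomb (d.get? s) (minE? s l) := by
  intro l
  induction l with
  | nil =>
    intro d
    rw [List.foldl_nil]
    rw [show minE? s [] = none from rfl, ocomb_none_right]
  | cons p t ih =>
    intro d
    rw [List.foldl_cons, ih, sMinDict_step_get?, minE?_cons, ocomb_minStep]

theorem sMinDict_get? (t1 : List (Int × Int)) (s : Int) : (sMinDict t1).get? s = minE? s t1 := by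
  unfold sMinDict
  rw [sMinDict_fold_get?]
  simp [ocomb, PySem.Dict.get?_empty]

-- ---- sortedness of sorted2

theorem insertBy_pairwise_lexLE (bef : Int × Int → Int × Int → Bool)
    (hbef : ∀ p q, bef p q = (decide (p.1 < q.1) || (!decide (q.1 < p.1) && decide (p.2 < q.2))))
    (x : Int × Int) : ∀ (ys : List (Int × Int)), ys.Pairwise lexLE → (PySem.List.insertBy bef x ys).Pairwise lexLE := by
  intro ys
  induction ys with
  | nil => intro _; simp [PySem.List.insertBy]
  | cons y t ih =>
    intro h
    rw [List.pairwise_cons] at h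
    by_cases hb : bef x y = true
    · have hxy : lexLE x y := by
        rw [hbef] at hb; simp at hb
        unfold lexLE; omega
      simp only [PySem.List.insertBy, hb, if_true]
      rw [List.pairwise_cons]
      constructor
      · intro z hz
        rcases List.mem_cons.mp hz with h1 | h2
        · exact h1 ▸ hxy
        · have hyz := h.1 z h2
          unfold lexLE at hxy hyz ⊢; omega
      · exact List.pairwise_cons.mpr h
    · have hyx : lexLE y x := by
        rw [hbef] at hb; simp at hb
        unfold lexLE; omega
      have hb' : bef x y = false := by simpa using hb
      simp only [PySem.List.insertBy, hb', Bool.false_eq_true, if_false]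
      rw [List.pairwise_cons]
      refine ⟨?_, ih h.2⟩
      intro z hz
      rcases (PySem.List.mem_insertBy bef x z t).mp hz with h1 | h2
      · exact h1 ▸ hyx
      · exact h.1 z h2

theorem sorted2_pairwise (xs : List (Int × Int)) : (PySem.List.sorted2 xs Prod.fst Prod.snd false).Pairwise lexLE := by
  show (xs.foldl (fun acc x => PySem.List.insertBy _ x acc) []).Pairwise lexLE
  generalize hacc : ([] : List (Int × Int)) = acc
  have hp : acc.Pairwise lexLE := by rw [← hacc]; simp
  clear hacc
  induction xs generalizing acc with
  | nil => simpa using hp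
  | cons x t ih =>
    rw [List.foldl_cons]
    exact ih _ (insertBy_pairwise_lexLE _ (fun p q => rfl) x acc hp)

-- ---- group lemmas

theorem sMinGroup_min (sid : Int) : ∀ (l : List (Int × Int)) (m0 : Int),
    l.Pairwise lexLE → (∀ x ∈ l, sid ≤ x.1) →
    (sMinGroup sid m0 l).1 = (match minE? sid l with | none => m0 | some m => min m0 m) := by
  intro l
  induction l with
  | nil => intro m0 _ _; simp [sMinGroup, minE?]
  | cons p t ih =>
    intro m0 hpw hle
    rw [List.pairwise_cons] at hpw
    by_cases hp : p.1 = sid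
    · have ht := ih (if p.2 < m0 then p.2 else m0) hpw.2 (fun x hx => hle x (by simp [hx]))
      simp only [sMinGroup, hp, if_true, ht]
      rw [minE?_cons]
      cases hmt : minE? sid t <;>
        simp only [minStep, hp, if_true] <;>
        simp only [min_def] <;> split_ifs <;> omega
    · have hnone : minE? sid (p :: t) = none := by
        apply minE?_eq_none
        intro x hx
        rcases List.mem_cons.mp hx with h1 | h2
        · exact h1 ▸ hp
        · have h3 := hpw.1 x h2
          have h4 := hle p (by simp)
          unfold lexLE at h3; omega
      simp [sMinGroup, hp, hnone]

theorem sMinGroup_split (sid : Int) : ∀ (l : List (Int × Int)) (m0 : Int),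
    ∃ g, l = g ++ (sMinGroup sid m0 l).2 ∧ (∀ x ∈ g, x.1 = sid) ∧
      ((sMinGroup sid m0 l).2 = [] ∨ ∃ h t', (sMinGroup sid m0 l).2 = h :: t' ∧ h.1 ≠ sid) := by
  intro l
  induction l with
  | nil => intro m0; exact ⟨[], by simp [sMinGroup]⟩
  | cons p t ih =>
    intro m0
    by_cases hp : p.1 = sid
    · obtain ⟨g, hg1, hg2, hg3⟩ := ih (if p.2 < m0 then p.2 else m0)
      exact ⟨p :: g, by simp [sMinGroup, hp, ← hg1], by
        intro x hx; rcases List.mem_cons.mp hx with h1 | h2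
        · exact h1 ▸ hp
        · exact hg2 x h2, by simpa [sMinGroup, hp] using hg3⟩
    · exact ⟨[], by simp [sMinGroup, hp]⟩

theorem sEmitGroup_spec (sid : Int) (m : Int) : ∀ (l : List (Int × Int)),
    ∃ g, l = g ++ (sEmitGroup sid m l).2 ∧ (∀ x ∈ g, x.1 = sid) ∧
      (sEmitGroup sid m l).1 = g.filter (fun q => decide (m < q.2)) ∧
      ((sEmitGroup sid m l).2 = [] ∨ ∃ h t', (sEmitGroup sid m l).2 = h :: t' ∧ h.1 ≠ sid) := by
  intro l
  induction l with
  | nil => exact ⟨[], by simp [sEmitGroup]⟩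
  | cons q t ih =>
    by_cases hq : q.1 = sid
    · obtain ⟨g, hg1, hg2, hg3, hg4⟩ := ih
      refine ⟨q :: g, by simp [sEmitGroup, hq, ← hg1], ?_, ?_, by simpa [sEmitGroup, hq] using hg4⟩
      · intro x hx; rcases List.mem_cons.mp hx with h1 | h2
        · exact h1 ▸ hq
        · exact hg2 x h2
      · by_cases hlt : m < q.2 <;> simp [sEmitGroup, hq, hlt, hg3]
    · exact ⟨[], by simp [sEmitGroup, hq]⟩

-- ---- the merge equals one filtering pass

def sPred (a : List (Int × Int)) (q : Int × Int) : Bool :=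
  match minE? q.1 a with
  | none => false
  | some m => decide (m < q.2)

theorem sPred_congr_gt (sid : Int) (p : Int × Int) (as_ : List (Int × Int)) (hp : p.1 = sid)
    (g as' : List (Int × Int)) (hsplit : as_ = g ++ as') (hg : ∀ x ∈ g, x.1 = sid)
    (q : Int × Int) (hq : sid < q.1) : sPred (p :: as_) q = sPred as' q := by
  unfold sPred
  rw [minE?_cons_ne _ _ _ (by omega), hsplit, minE?_append_ne _ _ _ (fun x hx => by have := hg x hx; omega)]

theorem pairwise_suffix_of_append {g r : List (Int × Int)} (h : (g ++ r).Pairwise lexLE) : r.Pairwise lexLE :=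
  (List.pairwise_append.mp h).2.1

theorem sPred_nil (q : Int × Int) : sPred [] q = false := rfl

theorem sMerge_eq_filter : ∀ (a b : List (Int × Int)), a.Pairwise lexLE → b.Pairwise lexLE →
    sMerge a b = b.filter (sPred a) := by
  intro a b
  fun_induction sMerge a b with
  | case1 b =>
    intro _ _
    symm
    simp [sPred_nil]
  | case2 p as_ =>
    intro _ _
    rfl
  | case3 p as_ q bs hlt ih =>
    intro ha hb
    rw [List.pairwise_cons] at ha hb
    rw [ih ha.2 (List.pairwise_cons.mpr hb)]
    apply List.filter_congr
    intro x hx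
    have hx1 : q.1 ≤ x.1 := by
      rcases List.mem_cons.mp hx with rfl | hxt
      · omega
      · have := hb.1 x hxt; unfold lexLE at this; omega
    rw [sPred, sPred, minE?_cons_ne _ _ _ (by omega)]
  | case4 p as_ q bs hnlt hlt ih =>
    intro ha hb
    rw [List.pairwise_cons] at hb
    rw [ih ha hb.2]
    have hq : sPred (p :: as_) q = false := by
      rw [List.pairwise_cons] at ha
      rw [sPred]
      have : minE? q.1 (p :: as_) = none := by
        apply minE?_eq_none
        intro x hx
        rcases List.mem_cons.mp hx with rfl | hxt
        · omega
        · have := ha.1 x hxt; unfold lexLE at this; omega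
      simp [this]
    simp [hq]
  | case5 p as_ q bs hnlt1 hnlt2 g1 g2 ih =>
    intro ha hb
    have hpq : q.1 = p.1 := by omega
    rw [List.pairwise_cons] at ha
    have hle : ∀ x ∈ as_, p.1 ≤ x.1 := by
      intro x hx; have := ha.1 x hx; unfold lexLE at this; omega
    obtain ⟨ga, hga1, hga2, hga3⟩ := sMinGroup_split p.1 as_ p.2
    have hg1 : sMinGroup p.1 p.2 as_ = g1 := rfl
    rw [hg1] at hga1 hga3
    -- minE? over the whole (sorted) a is exactly the group minimum m
    have hminA : minE? p.1 (p :: as_) = some g1.1 := by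
      rw [minE?_cons]
      show minStep p.1 p (minE? p.1 as_) = _
      unfold minStep
      rw [if_pos rfl, ← hg1, sMinGroup_min p.1 as_ p.2 ha.2 hle]
    have has'pw : g1.2.Pairwise lexLE := by
      rw [hga1] at ha
      exact pairwise_suffix_of_append ha.2
    have has'gt : ∀ x ∈ g1.2, p.1 < x.1 := by
      rcases hga3 with hnil | ⟨h0, t', heq, hne⟩
      · simp [hnil]
      · intro x hx
        have hx0 : p.1 ≤ h0.1 := hle h0 (by rw [hga1, heq]; simp)
        rw [heq] at hx has'pw
        rcases List.mem_cons.mp hx with rfl | hxt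
        · omega
        · have := (List.pairwise_cons.mp has'pw).1 x hxt
          unfold lexLE at this; omega
    obtain ⟨gb, hgb1, hgb2, hgb3, hgb4⟩ := sEmitGroup_spec p.1 g1.1 (q :: bs)
    have hg2 : sEmitGroup p.1 g1.1 (q :: bs) = g2 := rfl
    rw [hg2] at hgb1 hgb3 hgb4
    have hbpw' : g2.2.Pairwise lexLE := by
      rw [hgb1] at hb
      exact pairwise_suffix_of_append hb
    have hble : ∀ x ∈ q :: bs, p.1 ≤ x.1 := by
      rw [List.pairwise_cons] at hb
      intro x hx
      rcases List.mem_cons.mp hx with rfl | hxt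
      · omega
      · have := hb.1 x hxt; unfold lexLE at this; omega
    have hbgt : ∀ x ∈ g2.2, p.1 < x.1 := by
      rcases hgb4 with hnil | ⟨h0, t', heq, hne⟩
      · simp [hnil]
      · intro x hx
        have hx0 : p.1 ≤ h0.1 := hble h0 (by rw [hgb1, heq]; simp)
        rw [heq] at hx hbpw'
        rcases List.mem_cons.mp hx with rfl | hxt
        · omega
        · have := (List.pairwise_cons.mp hbpw').1 x hxt
          unfold lexLE at this; omega
    rw [ih has'pw hbpw', hgb1, List.filter_append]
    congr 1
    · rw [hgb3]
      symm
      apply List.filter_congr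
      intro x hx
      have hx1 : x.1 = p.1 := hgb2 x hx
      rw [sPred, hx1, hminA]
    · apply List.filter_congr
      intro x hx
      exact (sPred_congr_gt p.1 p as_ rfl ga g1.2 hga1 hga2 x (hbgt x hx)).symm

-- ---- fold-to-filter on the B side

theorem foldl_emit_eq_filter (d : PySem.Dict Int Int) : ∀ (l acc : List (Int × Int)),
    l.foldl (fun out q =>
      match d.get? q.1 with
      | none => out
      | some m => if m < q.2 then out ++ [q] else out) acc
    = acc ++ l.filter (fun q => match d.get? q.1 with | none => false | some m => decide (m < q.2)) := by
  intro l
  induction l with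
  | nil => intro acc; simp
  | cons q t ih =>
    intro acc
    rw [List.foldl_cons, ih]
    cases hd : d.get? q.1 with
    | none => simp [hd]
    | some m => by_cases hlt : m < q.2 <;> simp [hd, hlt]

-- ===== VERDICT (by name: the statement is the Claim_ definition above) =====
theorem s_join_spec : Claim_equal_s_join := by
  intro t1 t2 _
  unfold Spec_s_join s_join s_join_alt
  rw [sMerge_eq_filter _ _ (sorted2_pairwise t1) (sorted2_pairwise t2), foldl_emit_eq_filter]
  rw [List.nil_append]
  apply List.filter_congr
  intro q _
  unfold sPred
  rw [sMinDict_get?, minE?_perm q.1 (PySem.List.sorted2_perm t1 Prod.fst Prod.snd false).symm]
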